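-- pv_equiv track=rewrite | github.com/NeverQuitYourDayDream/cfslns | python/1345B.py | solve
-- ===== SOURCE A (Python) =====
-- def cards(h):
--     res = 0
--     for i in range(1, h+1):
--         res += 3*i - 1
--     return res
--
-- def solve(n):
--     pyramids = 0
--
--     i = 1
--     while n > 0:
--         if n < 2:
--             break
--
--         if cards(i) <= n and cards(i+1) > n:
--             n -= cards(i)
--             pyramids += 1
--             i = 1
--         else:
--             i += 1
--
--     return pyramids
-- ===== SOURCE B (Python) =====
-- def pyr(h):
--     # cards needed for a pyramid of height h: sum_{i=1..h} (3i-1) = h*(3h+1)/2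
--     return h * (3 * h + 1) // 2
--
-- def solve(n):
--     count = 0
--     while n >= 2:
--         # binary search on [1, n+1) for the largest height lo with pyr(lo) <= n
--         lo, hi = 1, n + 1
--         while hi - lo > 1:
--             mid = (lo + hi) // 2
--             if pyr(mid) <= n:
--                 lo = mid
--             else:
--                 hi = mid
--         n -= pyr(lo)
--         count += 1
--     return count
-- ===== Notes on version B (the rewrite author's own statement) =====
-- stated objective: faster
-- what changed: Replaces the linear sum-loop cards() and the linear upward scan for the largest pyramid by the closed-form card count h*(3h+1)//2 and a binary search over [1, n+1) for the largest fitting pyramid height.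
import Mathlib
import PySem

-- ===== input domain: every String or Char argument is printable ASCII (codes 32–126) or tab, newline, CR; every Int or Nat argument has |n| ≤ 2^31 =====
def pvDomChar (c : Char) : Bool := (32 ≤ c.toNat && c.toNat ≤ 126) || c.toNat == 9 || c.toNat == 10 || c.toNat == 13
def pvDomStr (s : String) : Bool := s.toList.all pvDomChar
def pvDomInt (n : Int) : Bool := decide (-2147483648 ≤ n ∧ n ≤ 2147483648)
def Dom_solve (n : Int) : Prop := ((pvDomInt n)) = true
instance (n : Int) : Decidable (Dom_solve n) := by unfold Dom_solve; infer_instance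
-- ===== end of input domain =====

-- B replaces A's linear sum-loop and linear upward height scan by the closed-form card
-- count h*(3h+1)//2 and a binary search for the largest fitting pyramid height (objective: faster).

-- ===== PORT A =====
-- cards(h): the for-loop over range(1, h+1)
def cardsI (h : Int) : Int :=
  (PySem.List.pyRange 1 (h + 1) 1).foldl (fun res i => res + (3 * i - 1)) 0

-- A's while loop; `fuel` is only a totality guard: `solve` passes enough fuel that it is
-- never exhausted (proved in lemma A_main below).
def solveLoopA : Nat → Int → Int → Int → Int
  | 0, _, _, pyramids => pyramids
  | fuel + 1, n, i, pyramids =>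
    if n > 0 then
      if n < 2 then pyramids
      else if cardsI i ≤ n ∧ cardsI (i + 1) > n then
        solveLoopA fuel (n - cardsI i) 1 (pyramids + 1)
      else
        solveLoopA fuel n (i + 1) pyramids
    else pyramids

def solve (n : Int) : Int := solveLoopA ((n.toNat + 2) * (n.toNat + 2)) n 1 0

-- ===== PORT B =====
-- pyr(h) = h * (3*h + 1) // 2
def cardsB (h : Int) : Int := PySem.Int.floordiv (h * (3 * h + 1)) 2

-- B's inner binary-search loop over the interval [lo, hi); `fuel` is only a totality
-- guard: the callers pass the initial interval width, which is never exhausted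
-- (the interval shrinks by at least 1 per iteration; proved in bsearch_char below).
def bsearchF : Nat → Int → Int → Int → Int
  | 0, _, lo, _ => lo
  | fuel + 1, n, lo, hi =>
    if 1 < hi - lo then
      let mid := PySem.Int.floordiv (lo + hi) 2
      if cardsB mid ≤ n then bsearchF fuel n mid hi else bsearchF fuel n lo mid
    else lo

-- B's outer while loop; `fuel` = n.toNat is a totality guard, never exhausted since
-- n shrinks by at least 2 per iteration (proved in altF_full below).
def altLoopF : Nat → Int → Int → Int
  | 0, _, count => count
  | fuel + 1, n, count =>
    if 2 ≤ n then
      altLoopF fuel (n - cardsB (bsearchF n.toNat n 1 (n + 1))) (count + 1)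
    else count

def solve_alt (n : Int) : Int := altLoopF n.toNat n 0

-- ===== PRECONDITION & SPEC =====
def Spec_solve (n : Int) (out : Int) : Prop := out = solve_alt n
instance (n : Int) (out : Int) : Decidable (Spec_solve n out) := by unfold Spec_solve; infer_instance

-- ===== CLAIM (what is proved, stated in full; the proofs are below) =====
def Claim_equal_solve : Prop := ∀ (n : Int), Dom_solve n → Spec_solve n (solve n)

-- ===== LEMMAS AND PROOFS =====

theorem cardsB_two_mul (h : Int) : 2 * cardsB h = h * (3 * h + 1) := by
  obtain ⟨k, hk⟩ : ∃ k, h * (3 * h + 1) = 2 * k := by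
    rcases Int.even_or_odd h with ⟨k, hk⟩ | ⟨k, hk⟩
    · exact ⟨k * (3 * h + 1), by rw [hk]; ring⟩
    · exact ⟨h * (3 * k + 2), by rw [hk]; ring⟩
  unfold cardsB
  rw [PySem.Int.floordiv_eq_ediv_of_pos (by norm_num), hk,
    Int.mul_ediv_cancel_left _ (by norm_num)]

theorem cardsB_ge_two {h : Int} (h1 : 1 ≤ h) : 2 ≤ cardsB h := by
  have := cardsB_two_mul h
  nlinarith

theorem cardsB_mono {a b : Int} (h0 : 0 ≤ a) (hab : a ≤ b) : cardsB a ≤ cardsB b := by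
  have h1 := cardsB_two_mul a
  have h2 := cardsB_two_mul b
  nlinarith

theorem cardsI_eq_nat (k : Nat) : cardsI (k : Int) = cardsB (k : Int) := by
  induction k with
  | zero => decide
  | succ k ih =>
    have hsplit : PySem.List.pyRange 1 ((k : Int) + 1 + 1) 1 =
        PySem.List.pyRange 1 ((k : Int) + 1) 1 ++ [(k : Int) + 1] :=
      PySem.List.pyRange_one_succ_right (by omega)
    have h1 := cardsB_two_mul (k : Int)
    have h2 := cardsB_two_mul ((k : Int) + 1)
    unfold cardsI at ih ⊢
    push_cast
    rw [hsplit, List.foldl_append]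
    simp only [List.foldl_cons, List.foldl_nil]
    rw [ih]
    nlinarith

theorem cardsI_eq {h : Int} (h0 : 0 ≤ h) : cardsI h = cardsB h := by
  lift h to Nat using h0
  exact cardsI_eq_nat _

-- binary-search correctness: with fuel at least the interval width, the result L
-- satisfies 1 ≤ L, cardsB L ≤ n < cardsB (L+1)
theorem bsearch_char : ∀ (fuel : Nat) (n lo hi : Int), (hi - lo).toNat ≤ fuel → 1 ≤ lo →
    lo < hi → cardsB lo ≤ n → n < cardsB hi →
    1 ≤ bsearchF fuel n lo hi ∧ cardsB (bsearchF fuel n lo hi) ≤ n ∧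
      n < cardsB (bsearchF fuel n lo hi + 1) := by
  intro fuel
  induction fuel with
  | zero => intro n lo hi hk h1 hlt; omega
  | succ fuel ih =>
    intro n lo hi hk h1 hlt hlo hhi
    simp only [bsearchF]
    by_cases hd : 1 < hi - lo
    · rw [if_pos hd]
      have hm : PySem.Int.floordiv (lo + hi) 2 = (lo + hi) / 2 :=
        PySem.Int.floordiv_eq_ediv_of_pos (by omega)
      set mid := PySem.Int.floordiv (lo + hi) 2 with hmid
      have hb : lo + 1 ≤ mid ∧ mid ≤ hi - 1 := by omega
      by_cases hc : cardsB mid ≤ n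
      · rw [if_pos hc]
        exact ih n mid hi (by omega) (by omega) (by omega) hc hhi
      · rw [if_neg hc]
        exact ih n lo mid (by omega) h1 (by omega) hlo (by omega)
    · rw [if_neg hd]
      have : hi = lo + 1 := by omega
      exact ⟨h1, hlo, by rw [← this]; exact hhi⟩

theorem bsearch_main {n : Int} (h2 : 2 ≤ n) :
    1 ≤ bsearchF n.toNat n 1 (n + 1) ∧ cardsB (bsearchF n.toNat n 1 (n + 1)) ≤ n ∧
      n < cardsB (bsearchF n.toNat n 1 (n + 1) + 1) := by
  apply bsearch_char n.toNat n 1 (n + 1) (by omega) (by omega) (by omega)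
  · show cardsB 1 ≤ n
    have : cardsB 1 = 2 := by decide
    omega
  · have := cardsB_two_mul (n + 1)
    nlinarith

theorem altF_small {n : Int} (h : ¬ 2 ≤ n) : ∀ (f : Nat) (c : Int), altLoopF f n c = c := by
  intro f c
  cases f with
  | zero => rfl
  | succ f => show (if 2 ≤ n then _ else _) = _; rw [if_neg h]

-- any sufficient fuel computes the canonical value altLoopF n.toNat n 0, shifted by the accumulator
theorem altF_full : ∀ (fuel : Nat) (n c : Int), n.toNat ≤ fuel →
    altLoopF fuel n c = c + altLoopF n.toNat n 0 := by
  intro fuel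
  induction fuel using Nat.strong_induction_on with
  | _ fuel IH =>
    intro n c hn
    by_cases h : 2 ≤ n
    · obtain ⟨f, rfl⟩ : ∃ f, fuel = f + 1 := ⟨fuel - 1, by omega⟩
      have hL1 : 1 ≤ bsearchF n.toNat n 1 (n + 1) := (bsearch_main h).1
      have hLle : cardsB (bsearchF n.toNat n 1 (n + 1)) ≤ n := (bsearch_main h).2.1
      have hc2 : 2 ≤ cardsB (bsearchF n.toNat n 1 (n + 1)) := cardsB_ge_two hL1
      set L := bsearchF n.toNat n 1 (n + 1) with hLdef
      obtain ⟨t, ht⟩ : ∃ t, n.toNat = t + 1 := ⟨n.toNat - 1, by omega⟩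
      have e1 : altLoopF (f + 1) n c = altLoopF f (n - cardsB L) (c + 1) := by
        show (if 2 ≤ n then _ else _) = _
        rw [if_pos h, ← hLdef]
      have e2 : altLoopF n.toNat n 0 = altLoopF t (n - cardsB L) (0 + 1) := by
        rw [ht]
        show (if 2 ≤ n then _ else _) = _
        rw [if_pos h, ← hLdef]
      rw [e1, e2, IH f (by omega) (n - cardsB L) (c + 1) (by omega),
        IH t (by omega) (n - cardsB L) (0 + 1) (by omega)]
      ring
    · rw [altF_small h, altF_small h]
      ring

theorem altF_pos {n : Int} (h : 2 ≤ n) :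
    solve_alt n = 1 + solve_alt (n - cardsB (bsearchF n.toNat n 1 (n + 1))) := by
  have hL1 : 1 ≤ bsearchF n.toNat n 1 (n + 1) := (bsearch_main h).1
  have hLle : cardsB (bsearchF n.toNat n 1 (n + 1)) ≤ n := (bsearch_main h).2.1
  have hc2 : 2 ≤ cardsB (bsearchF n.toNat n 1 (n + 1)) := cardsB_ge_two hL1
  set L := bsearchF n.toNat n 1 (n + 1) with hLdef
  obtain ⟨t, ht⟩ : ∃ t, n.toNat = t + 1 := ⟨n.toNat - 1, by omega⟩
  unfold solve_alt
  have e2 : altLoopF n.toNat n 0 = altLoopF t (n - cardsB L) (0 + 1) := by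
    rw [ht]
    show (if 2 ≤ n then _ else _) = _
    rw [if_pos h, ← hLdef]
  rw [e2, altF_full t (n - cardsB L) (0 + 1) (by omega)]
  ring

theorem altF_neg {n : Int} (h : ¬ 2 ≤ n) : solve_alt n = 0 := altF_small h _ _

-- one round of A's scan: from height i it climbs to the greedy height L and subtracts
theorem roundA : ∀ (d fuel : Nat) (n i p L : Int), 2 ≤ n → 1 ≤ i → cardsB i ≤ n →
    cardsB L ≤ n → n < cardsB (L + 1) → i + d = L → d + 1 ≤ fuel →
    solveLoopA fuel n i p = solveLoopA (fuel - (d + 1)) (n - cardsB L) 1 (p + 1) := by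
  intro d
  induction d with
  | zero =>
    intro fuel n i p L hn hi hci hcL hcL1 hiL hfuel
    obtain ⟨f, rfl⟩ : ∃ f, fuel = f + 1 := ⟨fuel - 1, by omega⟩
    have hiL' : i = L := by omega
    subst hiL'
    show (if n > 0 then _ else _) = _
    rw [if_pos (by omega : n > 0), if_neg (by omega : ¬ n < 2),
      if_pos ⟨by rwa [cardsI_eq (by omega)], by rw [cardsI_eq (by omega)]; omega⟩,
      cardsI_eq (by omega : (0:Int) ≤ i)]
    have hf : f + 1 - (0 + 1) = f := by omega
    rw [hf]
  | succ d ih =>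
    intro fuel n i p L hn hi hci hcL hcL1 hiL hfuel
    obtain ⟨f, rfl⟩ : ∃ f, fuel = f + 1 := ⟨fuel - 1, by omega⟩
    have hnext : cardsI (i + 1) ≤ n := by
      rw [cardsI_eq (by omega)]
      exact le_trans (cardsB_mono (by omega) (by omega)) hcL
    show (if n > 0 then _ else _) = _
    rw [if_pos (by omega : n > 0), if_neg (by omega : ¬ n < 2),
      if_neg (by intro hcond; omega)]
    rw [ih f n (i + 1) p L hn (by omega)
      (by rw [← cardsI_eq (by omega)]; exact hnext) hcL hcL1 (by omega) (by omega)]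
    congr 1
    omega

theorem A_main : ∀ (m : Nat) (n p : Int) (fuel : Nat), n.toNat ≤ m →
    (m + 1) * (m + 1) ≤ fuel → solveLoopA fuel n 1 p = p + solve_alt n := by
  intro m
  induction m using Nat.strong_induction_on with
  | _ m IH =>
    intro n p fuel hm hfuel
    have hfpos : 0 < fuel := lt_of_lt_of_le (by positivity) hfuel
    obtain ⟨f, rfl⟩ : ∃ f, fuel = f + 1 := ⟨fuel - 1, by omega⟩
    by_cases hpos : n > 0
    · by_cases hlt : n < 2
      · show (if n > 0 then _ else _) = _
        rw [if_pos hpos, if_pos hlt, altF_neg (by omega)]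
        ring
      · have h2 : 2 ≤ n := by omega
        obtain ⟨hL1, hLle, hLgt⟩ := bsearch_main h2
        set L := bsearchF n.toNat n 1 (n + 1) with hLdef
        have hcB1 : cardsB 1 = 2 := by decide
        have hcL2 : 2 ≤ cardsB L := cardsB_ge_two hL1
        have hLn : L ≤ n := by
          have := cardsB_two_mul L
          nlinarith
        have hm2 : 2 ≤ m := by omega
        obtain ⟨a, rfl⟩ : ∃ a, m = a + 2 := ⟨m - 2, by omega⟩
        have hfuel' : (a + 3) * (a + 3) ≤ f + 1 := by
          have h33 : a + 2 + 1 = a + 3 := rfl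
          rwa [h33] at hfuel
        have hbig : a + 3 ≤ (a + 3) * (a + 3) := Nat.le_mul_of_pos_left _ (by omega)
        have hd1 : (L - 1).toNat + 1 ≤ f + 1 := by omega
        rw [roundA (L - 1).toNat (f + 1) n 1 p L h2 (by omega) (by omega) hLle hLgt
          (by omega) hd1]
        have hsmall : (a + 1 + 1) * (a + 1 + 1) ≤ f + 1 - ((L - 1).toNat + 1) := by
          have h5 : (a + 2) * (a + 2) + (a + 2) ≤ (a + 3) * (a + 3) := by nlinarith
          have h6 : (a + 1 + 1) * (a + 1 + 1) = (a + 2) * (a + 2) := by norm_num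
          omega
        rw [IH (a + 1) (by omega) (n - cardsB L) (p + 1) _ (by omega) hsmall]
        rw [altF_pos h2, ← hLdef]
        ring
    · show (if n > 0 then _ else _) = _
      rw [if_neg hpos, altF_neg (by omega)]
      ring

-- ===== VERDICT (by name: the statement is the Claim_ definition above) =====
theorem solve_spec : Claim_equal_solve := by
  intro n _
  show solve n = solve_alt n
  unfold solve
  rw [A_main n.toNat n 0 _ (le_refl _) (by nlinarith)]
  ring
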